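-- pv_equiv track=rewrite | github.com/sunny-khatik/Love-Babbar-Sheet-Codes | RotiParatha.py | solve
-- ===== SOURCE A (Python) =====
-- def solve(a,n,p,mid):
--     time=0
--     tmp_p=0
--     for i in range(n):
--         time = a[i+1]
--         j=2
--         while time <= mid:
--             tmp_p+=1
--             time+=(j*a[i+1])
--             j+=1
--         if tmp_p >= p:
--             return 1
--     return 0
-- ===== SOURCE B (Python) =====
-- from math import isqrt
--
--
-- def solve(a, n, p, mid):
--     if n <= 0:
--         return 0
--     total = 0
--     for i in range(n):
--         r = a[i + 1]
--         if r <= mid: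
--             m = (2 * mid) // r
--             total += (isqrt(4 * m + 1) - 1) // 2
--     return 1 if total >= p else 0
-- ===== Notes on version B (the rewrite author's own statement) =====
-- stated objective: alternative
-- what changed: The inner while-loop that simulates cooking paratha by paratha is replaced by a closed-form count per cook (largest k with a[i+1]*k*(k+1)/2 <= mid, via integer sqrt), and the running-check early return is replaced by one final comparison of the total against p; intended as asymptotically faster per cook, but a timing run could not confirm it (A times out on the large random inputs).
-- outside the precondition, e.g. on solve([3, 1], 3, 1, 10): A returns 1, B raises IndexError
import Mathlib
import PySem

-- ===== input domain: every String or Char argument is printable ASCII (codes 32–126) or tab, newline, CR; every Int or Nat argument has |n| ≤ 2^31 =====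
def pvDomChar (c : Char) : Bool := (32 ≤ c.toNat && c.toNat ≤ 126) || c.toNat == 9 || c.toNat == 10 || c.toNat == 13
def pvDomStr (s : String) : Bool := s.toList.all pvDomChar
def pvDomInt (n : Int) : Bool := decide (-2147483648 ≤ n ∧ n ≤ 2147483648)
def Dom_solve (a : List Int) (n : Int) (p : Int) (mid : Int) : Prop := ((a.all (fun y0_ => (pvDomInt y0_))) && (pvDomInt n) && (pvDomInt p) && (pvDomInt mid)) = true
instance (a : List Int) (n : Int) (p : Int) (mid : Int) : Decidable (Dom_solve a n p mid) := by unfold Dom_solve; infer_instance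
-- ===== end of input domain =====

-- B replaces A's paratha-by-paratha inner simulation by a closed-form count per cook
-- (largest k with a[i+1]*k*(k+1)/2 ≤ mid, via integer square root) and one final
-- comparison of the total with p.

-- ===== PORT A =====
-- inner while-loop of A; the fuel only makes the recursion total (under Pre_solve it is
-- provably sufficient, see innerA_eq below), it adds no behaviour
def innerA (fuel : Nat) (mid r : Int) (time j tmp : Int) : Int :=
  match fuel with
  | 0 => tmp
  | Nat.succ f => if time ≤ mid then innerA f mid r (time + j * r) (j + 1) (tmp + 1) else tmp

-- the 'for i in range(n)' loop with the running counter tmp_p and the early return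
def outerA (a : List Int) (mid p : Int) (idxs : List Int) (tmp : Int) : Int :=
  match idxs with
  | [] => 0
  | i :: rest =>
    match PySem.List.pyGet? a (i + 1) with
    | none => 0  -- IndexError in Python; excluded by Pre_solve
    | some r =>
      let tmp' := innerA (mid.toNat + 1) mid r r 2 tmp
      if tmp' ≥ p then 1 else outerA a mid p rest tmp'

def solve (a : List Int) (n : Int) (p : Int) (mid : Int) : Int :=
  outerA a mid p (PySem.List.pyRange 0 n 1) 0

-- ===== PORT B =====
-- closed-form count for one cook: largest k ≥ 0 with r*k*(k+1)/2 ≤ mid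
def altCount (r mid : Int) : Int :=
  if r ≤ mid then
    -- m = (2*mid)//r ;  (isqrt(4*m+1)-1)//2   (isqrt is exact here: 4*m+1 ≥ 0 under Pre_solve)
    PySem.Int.floordiv ((Nat.sqrt (4 * PySem.Int.floordiv (2 * mid) r + 1).toNat : Int) - 1) 2
  else 0

def solve_alt (a : List Int) (n : Int) (p : Int) (mid : Int) : Int :=
  if n ≤ 0 then 0
  else
    let total := (PySem.List.pyRange 0 n 1).foldl
      (fun acc i =>
        match PySem.List.pyGet? a (i + 1) with
        | some r => acc + altCount r mid
        | none => acc)  -- IndexError in Python; excluded by Pre_solve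
      0
    if total ≥ p then 1 else 0

-- ===== PRECONDITION & SPEC =====
-- A loops forever when some accessed a[i+1] is ≤ 0 and ≤ mid, and raises IndexError when
-- i+1 ≥ len(a); Pre_ therefore demands (for n > 0) that a[1..n] exist and are positive.
-- This also excludes some inputs where A returns 1 early (tmp_p ≥ p) before reaching a
-- missing or non-positive element; B reads all n cooks and raises/diverges there too.
def Pre_solve (a : List Int) (n : Int) (p : Int) (mid : Int) : Prop :=
  n ≤ 0 ∨ (n < (a.length : Int) ∧ ∀ x ∈ (a.drop 1).take n.toNat, 0 < x)
instance (a : List Int) (n : Int) (p : Int) (mid : Int) : Decidable (Pre_solve a n p mid) := by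
  unfold Pre_solve; infer_instance

def pvWitness_solve : List Int × Int × Int × Int := ([0, 1, 2], 2, 3, 5)

def Spec_solve (a : List Int) (n : Int) (p : Int) (mid : Int) (out : Int) : Prop := out = solve_alt a n p mid
instance (a : List Int) (n : Int) (p : Int) (mid : Int) (out : Int) : Decidable (Spec_solve a n p mid out) := by unfold Spec_solve; infer_instance

-- ===== CLAIM (what is proved, stated in full; the proofs are below) =====
def Claim_equal_solve : Prop := ∀ (a : List Int) (n : Int) (p : Int) (mid : Int), Dom_solve a n p mid → Pre_solve a n p mid → Spec_solve a n p mid (solve a n p mid)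

-- ===== LEMMAS AND PROOFS =====

-- per-index count, used only in the proofs
def cnt (a : List Int) (mid i : Int) : Int :=
  match PySem.List.pyGet? a (i + 1) with
  | some r => altCount r mid
  | none => 0

theorem sqrt_quad (m : Nat) :
    1 ≤ Nat.sqrt (4*m+1) ∧
    ((Nat.sqrt (4*m+1) - 1)/2) * (((Nat.sqrt (4*m+1) - 1)/2) + 1) ≤ m ∧
    m < (((Nat.sqrt (4*m+1) - 1)/2) + 1) * (((Nat.sqrt (4*m+1) - 1)/2) + 2) := by
  have h1 : Nat.sqrt (4*m+1) * Nat.sqrt (4*m+1) ≤ 4*m+1 := by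
    have := Nat.sqrt_le' (4*m+1); nlinarith [this]
  have h2 : 4*m+1 < (Nat.sqrt (4*m+1)+1)*(Nat.sqrt (4*m+1)+1) := by
    have := Nat.lt_succ_sqrt' (4*m+1); nlinarith [this]
  set s := Nat.sqrt (4*m+1) with hs
  have hs1 : 1 ≤ s := by
    rcases Nat.eq_zero_or_pos s with h | h
    · rw [h] at h2; omega
    · exact h
  set k := (s-1)/2 with hk
  have hb : 2*k + 1 ≤ s ∧ s ≤ 2*k + 2 := by omega
  refine ⟨hs1, ?_, ?_⟩
  · nlinarith [hb.1, h1]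
  · nlinarith [hb.2, h2]

-- altCount r mid is exactly the number of iterations of A's inner loop:
-- it is ≥ 0 and, for t ≥ 1, r*t*(t+1) ≤ 2*mid ↔ t ≤ altCount r mid
theorem altCount_spec (r mid : Int) (hr : 0 < r) :
    0 ≤ altCount r mid ∧ ∀ t : Int, 1 ≤ t → (r * (t * (t + 1)) ≤ 2 * mid ↔ t ≤ altCount r mid) := by
  by_cases h : r ≤ mid
  · have hne : r ≠ 0 := by omega
    have hdiv : r * PySem.Int.floordiv (2*mid) r ≤ 2*mid ∧
        2*mid < r * (PySem.Int.floordiv (2*mid) r + 1) := by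
      rw [PySem.Int.floordiv_eq_ediv_of_pos hr]
      have h1 := Int.ediv_add_emod (2*mid) r
      have h2 := Int.emod_nonneg (2*mid) hne
      have h3 := Int.emod_lt_of_pos (2*mid) hr
      constructor <;> nlinarith [h1, h2, h3]
    set m := PySem.Int.floordiv (2*mid) r with hm
    have hm2 : 2 ≤ m := by nlinarith [hdiv.1, hdiv.2]
    set mN := m.toNat with hmN
    have hmc : (mN : Int) = m := Int.toNat_of_nonneg (by omega)
    obtain ⟨hs1, hlo, hhi⟩ := sqrt_quad mN
    have harg : (4*m+1).toNat = 4*mN+1 := by omega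
    set kN := (Nat.sqrt (4*mN+1) - 1)/2 with hkN
    have hval : altCount r mid = (kN : Int) := by
      unfold altCount
      rw [if_pos h, ← hm, harg]
      have hcast : ((Nat.sqrt (4*mN+1) : Int) - 1) = ((Nat.sqrt (4*mN+1) - 1 : Nat) : Int) := by
        omega
      rw [hcast]
      exact_mod_cast PySem.Int.floordiv_natCast (Nat.sqrt (4*mN+1) - 1) 2
    rw [hval]
    have hloI : (kN : Int) * (kN + 1) ≤ m := by
      exact_mod_cast hmc ▸ (by exact_mod_cast hlo : ((kN * (kN+1) : Nat) : Int) ≤ (mN : Int))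
    have hhiI : m < ((kN : Int) + 1) * (kN + 2) := by
      calc m = (mN : Int) := hmc.symm
        _ < (((kN+1)*(kN+2) : Nat) : Int) := by exact_mod_cast hhi
        _ = ((kN : Int) + 1) * (kN + 2) := by push_cast; ring
    refine ⟨by positivity, fun t ht => ?_⟩
    constructor
    · intro hle
      by_contra hgt
      push Not at hgt
      have h1 : (kN : Int) + 1 ≤ t := by omega
      have h2 : ((kN : Int) + 1) * (kN + 2) ≤ t * (t + 1) := by nlinarith [h1, ht]
      nlinarith [hdiv.2, hle, h2, hhiI, hr]
    · intro hle
      have h2 : t * (t + 1) ≤ (kN : Int) * (kN + 1) := by nlinarith [hle, ht]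
      have h3 : t * (t + 1) ≤ m := le_trans h2 hloI
      nlinarith [hdiv.1, h3, hr]
  · have hval : altCount r mid = 0 := by unfold altCount; rw [if_neg h]
    rw [hval]
    refine ⟨le_refl 0, fun t ht => ?_⟩
    constructor
    · intro hle
      exfalso
      have h2 : 2 ≤ t * (t+1) := by nlinarith [ht]
      nlinarith [hle, h2, hr]
    · intro hle; omega

theorem altCount_le (r mid : Int) (hr : 0 < r) : (altCount r mid).toNat ≤ mid.toNat + 1 := by
  obtain ⟨h0, hiff⟩ := altCount_spec r mid hr
  rcases eq_or_lt_of_le h0 with h | h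
  · omega
  · have h1 : 1 ≤ altCount r mid := h
    have h2 : r * (altCount r mid * (altCount r mid + 1)) ≤ 2 * mid :=
      (hiff (altCount r mid) h1).2 le_rfl
    have h3 : altCount r mid ≤ mid := by
      nlinarith [h2, h1, hr,
        mul_nonneg (by omega : (0:Int) ≤ r - 1) (by omega : (0:Int) ≤ altCount r mid),
        mul_nonneg (by omega : (0:Int) ≤ altCount r mid - 1) (by omega : (0:Int) ≤ altCount r mid)]
    omega

theorem innerA_eq (r mid : Int) (hr : 0 < r) :
    ∀ (fuel : Nat) (time j tmp : Int), 2 ≤ j → 2 * time = r * ((j - 1) * j) →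
      (altCount r mid + 2 - j).toNat ≤ fuel →
      innerA fuel mid r time j tmp = tmp + max 0 (altCount r mid + 2 - j) := by
  obtain ⟨h0, hiff⟩ := altCount_spec r mid hr
  intro fuel
  induction fuel with
  | zero =>
    intro time j tmp hj htime hfuel
    simp only [innerA]
    omega
  | succ f ih =>
    intro time j tmp hj htime hfuel
    simp only [innerA]
    by_cases hcond : time ≤ mid
    · rw [if_pos hcond]
      have hle : r * ((j - 1) * j) ≤ 2 * mid := by omega
      have hjk : j - 1 ≤ altCount r mid := by
        apply (hiff (j - 1) (by omega)).1
        have he : (j - 1) * ((j - 1) + 1) = (j - 1) * j := by ring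
        rw [he]; exact hle
      rw [ih (time + j * r) (j + 1) (tmp + 1) (by omega) (by nlinarith [htime]) (by omega)]
      omega
    · rw [if_neg hcond]
      have hgt : ¬ (j - 1 ≤ altCount r mid) := by
        intro hle
        have harg := (hiff (j - 1) (by omega)).2 hle
        have he : (j - 1) * ((j - 1) + 1) = (j - 1) * j := by ring
        rw [he] at harg
        omega
      omega

theorem sum_cnt_nonneg (a : List Int) (mid : Int) (idxs : List Int)
    (h : ∀ i ∈ idxs, ∃ r, PySem.List.pyGet? a (i + 1) = some r ∧ 0 < r) :
    0 ≤ ((idxs.map (cnt a mid)).sum) := by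
  induction idxs with
  | nil => simp
  | cons i rest ih =>
    simp only [List.map_cons, List.sum_cons]
    obtain ⟨r, hget, hrpos⟩ := h i (by simp)
    have h1 : 0 ≤ cnt a mid i := by
      unfold cnt; rw [hget]; exact (altCount_spec r mid hrpos).1
    have h2 := ih (fun i hi => h i (by simp [hi]))
    omega

-- A's outer loop with the early return equals one final comparison of the total with p
theorem outerA_eq (a : List Int) (mid p : Int) :
    ∀ (idxs : List Int) (tmp : Int), idxs ≠ [] →
      (∀ i ∈ idxs, ∃ r, PySem.List.pyGet? a (i + 1) = some r ∧ 0 < r) →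
      outerA a mid p idxs tmp = if p ≤ tmp + (idxs.map (cnt a mid)).sum then 1 else 0 := by
  intro idxs
  induction idxs with
  | nil => intro tmp hne _; exact absurd rfl hne
  | cons i rest ih =>
    intro tmp _ hvalid
    obtain ⟨r, hget, hrpos⟩ := hvalid i (by simp)
    have hcnt : cnt a mid i = altCount r mid := by unfold cnt; rw [hget]
    have hK0 := (altCount_spec r mid hrpos).1
    simp only [outerA]
    rw [hget]
    have hinner : innerA (mid.toNat + 1) mid r r 2 tmp = tmp + altCount r mid := by
      rw [innerA_eq r mid hrpos (mid.toNat + 1) r 2 tmp (le_refl 2) (by ring)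
        (by have := altCount_le r mid hrpos; omega)]
      omega
    simp only [hinner]
    have hrest0 : 0 ≤ ((rest.map (cnt a mid)).sum) :=
      sum_cnt_nonneg a mid rest (fun i hi => hvalid i (by simp [hi]))
    rcases eq_or_ne rest [] with hrest | hne
    · subst hrest
      simp only [outerA, List.map_cons, List.map_nil, List.sum_cons, List.sum_nil, hcnt]
      split_ifs <;> omega
    · rw [ih (tmp + altCount r mid) hne (fun i hi => hvalid i (by simp [hi]))]
      simp only [List.map_cons, List.sum_cons, hcnt]
      split_ifs <;> omega

theorem foldl_cnt (a : List Int) (mid : Int) :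
    ∀ (idxs : List Int) (c : Int),
      idxs.foldl (fun acc i =>
        match PySem.List.pyGet? a (i + 1) with
        | some r => acc + altCount r mid
        | none => acc) c = c + (idxs.map (cnt a mid)).sum := by
  intro idxs
  induction idxs with
  | nil => intro c; simp
  | cons i rest ih =>
    intro c
    simp only [List.foldl_cons, List.map_cons, List.sum_cons, ih]
    unfold cnt
    cases PySem.List.pyGet? a (i + 1) <;> simp <;> ring

-- ===== VERDICT (by name: the statement is the Claim_ definition above) =====
theorem solve_spec : Claim_equal_solve := by
  intro a n p mid _ hpre
  unfold Spec_solve solve solve_alt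
  by_cases hn : n ≤ 0
  · rw [PySem.List.pyRange_one_eq_nil (by omega), if_pos hn]
    simp [outerA]
  · rw [if_neg hn]
    have hpre' : n < (a.length : Int) ∧ ∀ x ∈ (a.drop 1).take n.toNat, 0 < x := by
      rcases hpre with h | h
      · omega
      · exact h
    have hvalid : ∀ i ∈ PySem.List.pyRange 0 n 1,
        ∃ r, PySem.List.pyGet? a (i + 1) = some r ∧ 0 < r := by
      intro i hi
      rw [PySem.List.mem_pyRange_one] at hi
      have hidx : (i + 1).toNat < a.length := by omega
      have hget : PySem.List.pyGet? a (i + 1) = some (a[(i + 1).toNat]'hidx) := by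
        rw [PySem.List.pyGet?_of_nonneg (xs := a) (by omega : (0:Int) ≤ i + 1)]
        exact List.getElem?_eq_getElem hidx
      refine ⟨_, hget, ?_⟩
      apply hpre'.2
      have h1 : i.toNat < ((a.drop 1).take n.toNat).length := by
        simp only [List.length_take, List.length_drop]; omega
      have h2 : ((a.drop 1).take n.toNat)[i.toNat]'h1 = a[(i + 1).toNat]'hidx := by
        simp only [List.getElem_take, List.getElem_drop]
        congr 1; omega
      rw [← h2]
      exact List.getElem_mem h1
    have hne : PySem.List.pyRange 0 n 1 ≠ [] := by
      rw [PySem.List.pyRange_one_cons (by omega)]; simp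
    rw [outerA_eq a mid p _ 0 hne hvalid, foldl_cnt]
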